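-- pv_equiv track=rewrite | github.com/wNeal/pe_python | ex5.py | simplify_divisors
-- ===== SOURCE A (Python) =====
-- def simplify_divisors(d_list):
--     d_list.sort()
--     largest = d_list[-1]
--     d_set = set(d_list)
--
--     # Remove any factors
--     for d in d_list:
--         for f in d_list:
--             if d != f and d % f == 0:
--                 d_set.discard(f)
--     return (d_set, largest)
-- ===== SOURCE B (Python) =====
-- def simplify_divisors(d_list):
--     d_list.sort()
--     largest = d_list[-1]
--     present = set(d_list)
--
--     # Mark every present proper divisor, enumerating divisors up to sqrt(|d|)
--     removed = set()
--     for d in present: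
--         if d == 0:
--             continue
--         a = abs(d)
--         i = 1
--         while i * i <= a:
--             if a % i == 0:
--                 for f in (i, -i, a // i, -(a // i)):
--                     if f != d and f in present:
--                         removed.add(f)
--             i += 1
--     keep = {x for x in present if x not in removed}
--     return (keep, largest)
-- ===== Notes on version B (the rewrite author's own statement) =====
-- stated objective: faster
-- what changed: A tests all O(n^2) ordered pairs for divisibility; B enumerates, for each distinct element d, the divisors of |d| up to sqrt(|d|) (with their signed cofactors) and marks those present in a hash set, so the inner scan over the list disappears.
import Mathlib
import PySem

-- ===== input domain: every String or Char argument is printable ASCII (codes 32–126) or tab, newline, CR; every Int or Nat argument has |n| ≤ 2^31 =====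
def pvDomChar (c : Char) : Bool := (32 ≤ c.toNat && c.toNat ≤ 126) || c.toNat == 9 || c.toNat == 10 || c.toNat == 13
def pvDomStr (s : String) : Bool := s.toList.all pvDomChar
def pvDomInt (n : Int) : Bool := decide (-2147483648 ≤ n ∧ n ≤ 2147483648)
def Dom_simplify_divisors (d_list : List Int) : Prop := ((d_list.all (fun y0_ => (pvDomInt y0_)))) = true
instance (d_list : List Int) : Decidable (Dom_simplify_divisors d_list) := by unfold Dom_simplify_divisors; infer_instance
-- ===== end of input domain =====

-- B replaces A's quadratic all-pairs divisibility scan by enumerating, for each distinct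
-- element d, the divisors of |d| up to sqrt(|d|) and marking the present ones — O(n·sqrt M)
-- instead of O(n²).  Both A and B sort d_list in place; the equivalence is about the return
-- value (the returned set's element order follows the model: sorted first-insertion order).

-- ===== PORT A =====
def simplify_divisors (d_list : List Int) : List Int × Int :=
  let sorted := PySem.List.sorted d_list (fun x => x) false
  match PySem.List.pyGet? sorted (-1) with
  | none => ([], 0)          -- d_list[-1] raises IndexError on []: excluded by Pre_
  | some largest =>
    let d_set : PySem.Set Int := PySem.Set.ofList sorted
    let d_set := sorted.foldl (fun s d =>
      sorted.foldl (fun s f =>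
        if d ≠ f ∧ PySem.Int.mod d f = 0 then PySem.Set.discard s f else s) s) d_set
    (d_set, largest)

-- ===== PORT B =====
-- the 'while i*i <= a' loop of Source B; a = abs(d) ≥ 0, so Nat's % and / are exact here
def altInner (present : PySem.Set Int) (d : Int) (a : Nat) (removed : PySem.Set Int)
    (i : Nat) (fuel : Nat) : PySem.Set Int :=
  match fuel with
  | 0 => removed                -- never reached: fuel = a + 1 bounds the iteration count
  | fuel + 1 =>
    if i * i ≤ a then
      let removed' := if a % i = 0 then
          ([(i : Int), -(i : Int), ((a / i : Nat) : Int), -((a / i : Nat) : Int)]).foldl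
            (fun r f => if f ≠ d ∧ PySem.Set.contains present f then PySem.Set.add r f else r)
            removed
        else removed
      altInner present d a removed' (i + 1) fuel
    else removed

def simplify_divisors_alt (d_list : List Int) : List Int × Int :=
  let sorted := PySem.List.sorted d_list (fun x => x) false
  match PySem.List.pyGet? sorted (-1) with
  | none => ([], 0)          -- d_list[-1] raises IndexError on []: excluded by Pre_
  | some largest =>
    let present : PySem.Set Int := PySem.Set.ofList sorted
    let removed := present.foldl
      (fun r d => if d = 0 then r else altInner present d d.natAbs r 1 (d.natAbs + 1)) PySem.Set.empty
    let keep := present.foldl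
      (fun k x => if ¬ PySem.Set.contains removed x then PySem.Set.add k x else k)
      PySem.Set.empty
    (keep, largest)

-- ===== PRECONDITION & SPEC =====
-- Pre_ excludes exactly the inputs where A raises: the empty list (IndexError on d_list[-1])
-- and lists containing 0 together with a nonzero element (ZeroDivisionError on d % 0).
def Pre_simplify_divisors (d_list : List Int) : Prop :=
  d_list ≠ [] ∧ ((0 : Int) ∈ d_list → ∀ x ∈ d_list, x = 0)
instance (d_list : List Int) : Decidable (Pre_simplify_divisors d_list) := by
  unfold Pre_simplify_divisors; infer_instance
def pvWitness_simplify_divisors : List Int := [2, 3, 6]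

def Spec_simplify_divisors (d_list : List Int) (out : List Int × Int) : Prop :=
  out = simplify_divisors_alt d_list
instance (d_list : List Int) (out : List Int × Int) : Decidable (Spec_simplify_divisors d_list out) := by
  unfold Spec_simplify_divisors; infer_instance

-- ===== CLAIM (what is proved, stated in full; the proofs are below) =====
def Claim_equal_simplify_divisors : Prop := ∀ (d_list : List Int), Dom_simplify_divisors d_list → Pre_simplify_divisors d_list → Spec_simplify_divisors d_list (simplify_divisors d_list)

-- ===== LEMMAS AND PROOFS =====

-- A's inner loop: folding conditional discards is a filter
theorem A_inner_filter (d : Int) (fs s : List Int) :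
    fs.foldl (fun s f => if d ≠ f ∧ PySem.Int.mod d f = 0 then PySem.Set.discard s f else s) s
      = s.filter (fun x => !decide (x ∈ fs ∧ d ≠ x ∧ x ∣ d)) := by
  induction fs generalizing s with
  | nil => simp
  | cons f fs ih =>
    simp only [List.foldl_cons, ih]
    by_cases hR : d ≠ f ∧ PySem.Int.mod d f = 0
    · simp only [if_pos hR, PySem.Set.discard, List.filter_filter]
      apply List.filter_congr
      intro x _
      by_cases hx : x = f
      · subst hx
        have : x ∣ d := (PySem.Int.mod_eq_zero_iff_dvd d x).mp hR.2
        simp [hR.1, this]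
      · simp [hx, List.mem_cons]
    · simp only [if_neg hR]
      apply List.filter_congr
      intro x _
      by_cases hx : x = f
      · subst hx
        have : ¬ (d ≠ x ∧ x ∣ d) := by
          intro ⟨h1, h2⟩
          exact hR ⟨h1, (PySem.Int.mod_eq_zero_iff_dvd d x).mpr h2⟩
        simp [List.mem_cons, this]
      · simp [hx, List.mem_cons]

-- A's nested loops: filter by "some listed d has x as proper divisor"
theorem A_outer_filter (ds fs s : List Int) :
    ds.foldl (fun s d =>
        fs.foldl (fun s f =>
          if d ≠ f ∧ PySem.Int.mod d f = 0 then PySem.Set.discard s f else s) s) s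
      = s.filter (fun x => !decide (∃ d ∈ ds, x ∈ fs ∧ d ≠ x ∧ x ∣ d)) := by
  induction ds generalizing s with
  | nil => simp
  | cons d ds ih =>
    rw [List.foldl_cons, A_inner_filter, ih, List.filter_filter]
    apply List.filter_congr
    intro x _
    by_cases h1 : x ∈ fs ∧ d ≠ x ∧ x ∣ d <;>
      by_cases h2 : ∃ e ∈ ds, x ∈ fs ∧ e ≠ x ∧ x ∣ e <;>
        simp [h1, h2, List.mem_cons]

-- B's little foldl over the four signed candidates
theorem mem_foldl_cand (present : PySem.Set Int) (d : Int) (cands : List Int)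
    (r : PySem.Set Int) (x : Int) :
    x ∈ cands.foldl
        (fun r f => if f ≠ d ∧ PySem.Set.contains present f then PySem.Set.add r f else r) r
      ↔ x ∈ r ∨ (x ∈ cands ∧ x ≠ d ∧ x ∈ present) := by
  induction cands generalizing r with
  | nil => simp
  | cons c cs ih =>
    simp only [List.foldl_cons, ih]
    by_cases hc : c ≠ d ∧ PySem.Set.contains present c
    · rw [if_pos hc]
      rw [PySem.Set.contains_iff] at hc
      constructor
      · rintro (h | h)
        · rw [PySem.Set.mem_add] at h
          rcases h with h | rfl
          · exact Or.inl h
          · exact Or.inr ⟨List.mem_cons_self, hc.1, hc.2⟩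
        · exact Or.inr ⟨List.mem_cons_of_mem _ h.1, h.2⟩
      · rintro (h | ⟨hm, hxd, hxp⟩)
        · exact Or.inl (by rw [PySem.Set.mem_add]; exact Or.inl h)
        · rcases List.mem_cons.mp hm with rfl | hm
          · exact Or.inl (by rw [PySem.Set.mem_add]; exact Or.inr rfl)
          · exact Or.inr ⟨hm, hxd, hxp⟩
    · rw [if_neg hc]
      constructor
      · rintro (h | h)
        · exact Or.inl h
        · exact Or.inr ⟨List.mem_cons_of_mem _ h.1, h.2⟩
      · rintro (h | ⟨hm, hxd, hxp⟩)
        · exact Or.inl h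
        · rcases List.mem_cons.mp hm with rfl | hm
          · exact absurd ⟨hxd, (PySem.Set.contains_iff present x).mpr hxp⟩ hc
          · exact Or.inr ⟨hm, hxd, hxp⟩

-- membership after B's while loop
theorem mem_altInner (present : PySem.Set Int) (d : Int) (a : Nat) (r : PySem.Set Int)
    (i : Nat) (fuel : Nat) (hfuel : a + 1 ≤ i + fuel) (x : Int) :
    x ∈ altInner present d a r i fuel ↔ x ∈ r ∨ (x ≠ d ∧ x ∈ present ∧
      ∃ j, i ≤ j ∧ j * j ≤ a ∧ a % j = 0 ∧
        (x = (j : Int) ∨ x = -(j : Int) ∨ x = ((a / j : Nat) : Int) ∨ x = -((a / j : Nat) : Int))) := by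
  induction fuel generalizing i r with
  | zero =>
    simp only [altInner]
    constructor
    · exact Or.inl
    · rintro (h | ⟨-, -, j, hij, hjj, -⟩)
      · exact h
      · exfalso
        have h2 : j ≤ j * j := by
          rcases Nat.eq_zero_or_pos j with rfl | h
          · simp
          · exact Nat.le_mul_of_pos_left j h
        omega
  | succ fuel ih =>
    simp only [altInner]
    by_cases hii : i * i ≤ a
    · rw [if_pos hii]
      rw [ih _ _ (by omega)]
      have hcand : ∀ r' : PySem.Set Int,
          x ∈ (if a % i = 0 then
              ([(i : Int), -(i : Int), ((a / i : Nat) : Int), -((a / i : Nat) : Int)]).foldl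
                (fun r f => if f ≠ d ∧ PySem.Set.contains present f then PySem.Set.add r f else r) r'
            else r')
            ↔ x ∈ r' ∨ (a % i = 0 ∧ x ≠ d ∧ x ∈ present ∧
              (x = (i : Int) ∨ x = -(i : Int) ∨ x = ((a / i : Nat) : Int) ∨ x = -((a / i : Nat) : Int))) := by
        intro r'
        by_cases hmod : a % i = 0
        · rw [if_pos hmod, mem_foldl_cand]
          simp only [List.mem_cons, List.not_mem_nil, or_false]
          tauto
        · rw [if_neg hmod]; tauto
      rw [hcand]
      constructor
      · rintro ((h | h) | ⟨hxd, hxp, j, hj, hrest⟩)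
        · exact Or.inl h
        · exact Or.inr ⟨h.2.1, h.2.2.1, i, le_refl i, hii, h.1, h.2.2.2⟩
        · exact Or.inr ⟨hxd, hxp, j, by omega, hrest⟩
      · rintro (h | ⟨hxd, hxp, j, hij, hjj, hmod, hd⟩)
        · exact Or.inl (Or.inl h)
        · rcases Nat.eq_or_lt_of_le hij with rfl | hlt
          · exact Or.inl (Or.inr ⟨hmod, hxd, hxp, hd⟩)
          · exact Or.inr ⟨hxd, hxp, j, by omega, hjj, hmod, hd⟩
    · rw [if_neg hii]
      constructor
      · exact Or.inl
      · rintro (h | ⟨-, -, j, hij, hjj, -⟩)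
        · exact h
        · exfalso
          have : i * i ≤ j * j := Nat.mul_le_mul hij hij
          omega

-- enumerating j up to sqrt a together with a/j reaches every divisor
theorem divisor_enum (a m : Nat) (ha : 1 ≤ a) (hm : 1 ≤ m) :
    (∃ j, 1 ≤ j ∧ j * j ≤ a ∧ a % j = 0 ∧ (m = j ∨ m = a / j)) ↔ m ∣ a := by
  constructor
  · rintro ⟨j, hj1, hjj, hmod, rfl | rfl⟩
    · exact Nat.dvd_of_mod_eq_zero hmod
    · obtain ⟨c, rfl⟩ := Nat.dvd_of_mod_eq_zero hmod
      rw [Nat.mul_div_cancel_left c (by omega)]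
      exact dvd_mul_left c j
  · intro hdvd
    by_cases hsq : m * m ≤ a
    · exact ⟨m, hm, hsq, Nat.mod_eq_zero_of_dvd hdvd, Or.inl rfl⟩
    · obtain ⟨c, rfl⟩ := hdvd
      have hc1 : 1 ≤ c := by
        rcases Nat.eq_zero_or_pos c with rfl | h
        · omega
        · exact h
      have hcm : c < m := by
        by_contra h
        exact hsq (Nat.mul_le_mul_left m (by omega))
      refine ⟨c, hc1, ?_, ?_, Or.inr ?_⟩
      · calc c * c ≤ m * c := Nat.mul_le_mul_right c (le_of_lt hcm)
          _ = m * c := rfl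
      · exact Nat.mod_eq_zero_of_dvd (dvd_mul_left c m)
      · rw [Nat.mul_div_cancel m hc1]

-- the four signed candidates for some admissible j are exactly the nonzero divisors of d
theorem cand_iff (d x : Int) (hd : d ≠ 0) :
    (∃ j, 1 ≤ j ∧ j * j ≤ d.natAbs ∧ d.natAbs % j = 0 ∧
        (x = (j : Int) ∨ x = -(j : Int) ∨ x = ((d.natAbs / j : Nat) : Int) ∨ x = -((d.natAbs / j : Nat) : Int)))
      ↔ (x ≠ 0 ∧ x ∣ d) := by
  have ha : 1 ≤ d.natAbs := Nat.one_le_iff_ne_zero.mpr (Int.natAbs_ne_zero.mpr hd)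
  constructor
  · rintro ⟨j, hj1, hjj, hmod, hx⟩
    have hja : j ≤ d.natAbs := by
      have : j ≤ j * j := Nat.le_mul_of_pos_left j (by omega)
      omega
    have hq1 : 1 ≤ d.natAbs / j := (Nat.one_le_div_iff (by omega)).mpr hja
    have hnabs : x.natAbs = j ∨ x.natAbs = d.natAbs / j := by
      rcases hx with rfl | rfl | rfl | rfl <;> simp only [Int.natAbs_neg, Int.natAbs_natCast] <;> tauto
    have hx0 : x ≠ 0 := by
      intro h
      rw [h] at hnabs
      simp at hnabs
      omega
    refine ⟨hx0, ?_⟩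
    have : x.natAbs ∣ d.natAbs := by
      apply (divisor_enum d.natAbs x.natAbs ha (Nat.one_le_iff_ne_zero.mpr (Int.natAbs_ne_zero.mpr hx0))).mp
      exact ⟨j, hj1, hjj, hmod, hnabs⟩
    exact Int.natAbs_dvd_natAbs.mp this
  · rintro ⟨hx0, hdvd⟩
    have hm1 : 1 ≤ x.natAbs := Nat.one_le_iff_ne_zero.mpr (Int.natAbs_ne_zero.mpr hx0)
    obtain ⟨j, hj1, hjj, hmod, hm⟩ :=
      (divisor_enum d.natAbs x.natAbs ha hm1).mpr (Int.natAbs_dvd_natAbs.mpr hdvd)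
    refine ⟨j, hj1, hjj, hmod, ?_⟩
    rcases Int.natAbs_eq x with h | h <;> rcases hm with hm | hm <;> rw [hm] at h
    · exact Or.inl h
    · exact Or.inr (Or.inr (Or.inl h))
    · exact Or.inr (Or.inl h)
    · exact Or.inr (Or.inr (Or.inr h))

-- membership in B's removed set
theorem mem_removed (present : PySem.Set Int) (l : List Int) (r : PySem.Set Int) (x : Int) :
    x ∈ l.foldl (fun r d => if d = 0 then r else altInner present d d.natAbs r 1 (d.natAbs + 1)) r
      ↔ x ∈ r ∨ ∃ d ∈ l, d ≠ 0 ∧ x ≠ d ∧ x ∈ present ∧ x ≠ 0 ∧ x ∣ d := by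
  induction l generalizing r with
  | nil => simp
  | cons d l ih =>
    rw [List.foldl_cons, ih]
    by_cases hd : d = 0
    · rw [if_pos hd]
      subst hd
      constructor
      · rintro (h | h)
        · exact Or.inl h
        · exact Or.inr (by obtain ⟨e, he, hrest⟩ := h; exact ⟨e, List.mem_cons_of_mem _ he, hrest⟩)
      · rintro (h | ⟨e, he, he0, hrest⟩)
        · exact Or.inl h
        · rcases List.mem_cons.mp he with rfl | he
          · exact absurd rfl he0
          · exact Or.inr ⟨e, he, he0, hrest⟩
    · rw [if_neg hd, mem_altInner present d d.natAbs r 1 (d.natAbs + 1) (by omega)]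
      have := cand_iff d x hd
      constructor
      · rintro ((h | ⟨hxd, hxp, hj⟩) | h)
        · exact Or.inl h
        · obtain ⟨hx0, hdvd⟩ := this.mp hj
          exact Or.inr ⟨d, List.mem_cons_self, hd, hxd, hxp, hx0, hdvd⟩
        · exact Or.inr (by obtain ⟨e, he, hrest⟩ := h; exact ⟨e, List.mem_cons_of_mem _ he, hrest⟩)
      · rintro (h | ⟨e, he, he0, hxe, hxp, hx0, hdvd⟩)
        · exact Or.inl (Or.inl h)
        · rcases List.mem_cons.mp he with rfl | he
          · exact Or.inl (Or.inr ⟨hxe, hxp, this.mpr ⟨hx0, hdvd⟩⟩)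
          · exact Or.inr ⟨e, he, he0, hxe, hxp, hx0, hdvd⟩

-- B's comprehension: folding conditional adds over a nodup list is a filter
theorem foldl_add_if_filter (P : Int → Prop) [DecidablePred P] (l acc : List Int)
    (hl : l.Nodup) (hd : ∀ x ∈ l, x ∉ acc) :
    l.foldl (fun k x => if P x then PySem.Set.add k x else k) acc
      = acc ++ l.filter (fun x => decide (P x)) := by
  induction l generalizing acc with
  | nil => simp
  | cons a l ih =>
    rw [List.foldl_cons]
    by_cases hp : P a
    · have hnd : ∀ x ∈ l, x ∉ acc ++ [a] := by
        intro x hx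
        simp only [List.mem_append, List.mem_singleton]
        rintro (h | rfl)
        · exact hd x (List.mem_cons_of_mem _ hx) h
        · exact (List.nodup_cons.mp hl).1 hx
      rw [if_pos hp, PySem.Set.add_of_not_mem (hd a List.mem_cons_self),
        ih _ (List.Nodup.of_cons hl) hnd]
      simp [hp]
    · rw [if_neg hp, ih _ (List.Nodup.of_cons hl)
        (fun x hx => hd x (List.mem_cons_of_mem _ hx))]
      simp [hp]

-- ===== VERDICT (by name: the statement is the Claim_ definition above) =====
theorem simplify_divisors_spec : Claim_equal_simplify_divisors := by
  intro l _ hpre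
  obtain ⟨hne, h0⟩ := hpre
  unfold Spec_simplify_divisors simplify_divisors simplify_divisors_alt
  simp only
  cases hget : PySem.List.pyGet? (PySem.List.sorted l (fun x => x) false) (-1) with
  | none => rfl
  | some largest =>
    simp only
    refine Prod.ext ?_ rfl
    dsimp only
    rw [A_outer_filter]
    rw [foldl_add_if_filter
      (fun x => ¬ ((PySem.Set.ofList (PySem.List.sorted l (fun x => x) false)).foldl
          (fun r d => if d = 0 then r
            else altInner (PySem.Set.ofList (PySem.List.sorted l (fun x => x) false)) d d.natAbs r 1
              (d.natAbs + 1)) PySem.Set.empty).contains x = true)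
      (PySem.Set.ofList (PySem.List.sorted l (fun x => x) false)) PySem.Set.empty
      (PySem.Set.nodup_ofList _) (by intro x _; simp [PySem.Set.empty])]
    simp only [PySem.Set.empty, List.nil_append]
    have h0s : (0 : Int) ∈ PySem.List.sorted l (fun x => x) false →
        ∀ y ∈ PySem.List.sorted l (fun x => x) false, y = 0 := by
      intro hz y hy
      exact h0 ((PySem.List.mem_sorted _ _ _ _).mp hz) y ((PySem.List.mem_sorted _ _ _ _).mp hy)
    apply List.filter_congr
    intro x hxP
    have hxs : x ∈ PySem.List.sorted l (fun x => x) false := (PySem.Set.mem_ofList _ _).mp hxP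
    have hrem : ((PySem.Set.ofList (PySem.List.sorted l (fun x => x) false)).foldl
          (fun r d => if d = 0 then r
            else altInner (PySem.Set.ofList (PySem.List.sorted l (fun x => x) false)) d d.natAbs r 1
              (d.natAbs + 1)) ([] : PySem.Set Int)).contains x = true ↔
        ∃ d ∈ PySem.Set.ofList (PySem.List.sorted l (fun x => x) false), d ≠ 0 ∧ x ≠ d ∧
          x ∈ PySem.Set.ofList (PySem.List.sorted l (fun x => x) false) ∧ x ≠ 0 ∧ x ∣ d := by
      rw [PySem.Set.contains_iff, mem_removed]
      simp
    have hiff : (∃ d ∈ PySem.List.sorted l (fun x => x) false,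
          x ∈ PySem.List.sorted l (fun x => x) false ∧ d ≠ x ∧ x ∣ d) ↔
        ∃ d ∈ PySem.Set.ofList (PySem.List.sorted l (fun x => x) false), d ≠ 0 ∧ x ≠ d ∧
          x ∈ PySem.Set.ofList (PySem.List.sorted l (fun x => x) false) ∧ x ≠ 0 ∧ x ∣ d := by
      constructor
      · rintro ⟨d, hd, -, hdx, hdvd⟩
        have hd0 : d ≠ 0 := by
          intro h
          subst h
          exact hdx (h0s hd x hxs).symm
        have hx0 : x ≠ 0 := by
          intro h
          subst h
          exact hd0 (Int.zero_dvd.mp hdvd)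
        exact ⟨d, (PySem.Set.mem_ofList _ _).mpr hd, hd0, Ne.symm hdx, hxP, hx0, hdvd⟩
      · rintro ⟨d, hdP, hd0, hxd, -, hx0, hdvd⟩
        exact ⟨d, (PySem.Set.mem_ofList _ _).mp hdP, hxs, Ne.symm hxd, hdvd⟩
    simp only [decide_not]
    rw [decide_eq_decide.mpr hiff, decide_eq_decide.mpr hrem]
    · exact inferInstance
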